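-- pv_equiv track=rewrite | github.com/sadamapeach/Dasar-Pemrograman | Tugas4_24060121130060_Oktaviana Sadama Nur Azizah/Tugas 3/IsMemberLS.py | IsMemberLS
-- ===== SOURCE A (Python) =====
-- def is_empty_LoL(S):
--     if S == []:
--         return True
--     else:
--         return False
--
-- def first_List(S):
--     if not(is_empty_LoL(S)):
--         return S[0]
--
-- def tail_List(S):
--     if not(is_empty_LoL(S)):
--         return S[1:]
--
-- def is_atom(e):
--     if(type(e) != list):
--         return True
--     else:
--         return False
--
-- def is_empty(L):
--     if L == []:
--         return True
--     else:
--         return False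
--
-- def first_element(L):
--     if not (is_empty(L)):
--         return L[0]
--
-- def tail_element(L):
--     if not (is_empty(L)):
--         return L[1:]
--
-- def is_equal(L1,L2):
--     if is_empty(L1) and is_empty(L2):
--         return True
--     elif is_empty(L1) and not is_empty(L2):
--         return False
--     elif is_empty(L2) and not is_empty(L1):
--         return False
--     elif first_element(L1) == first_element(L2):
--         return is_equal(tail_element(L1),tail_element(L2))
--     else:
--         return False
--
-- def IsMemberLS(L,S):
--     if is_empty(L) and is_empty(S):
--         return True
--     elif not is_empty(L) and is_empty(S):
--         return False
--     elif is_empty(L) and not is_empty(S):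
--         return False
--     elif not is_empty(L) and not is_empty(S):
--         if (is_atom(first_List(S))):
--             return IsMemberLS(L,tail_List(S))
--         else:
--             if is_equal(L,first_List(S)):
--                 return True
--             else:
--                 return IsMemberLS(L,tail_List(S))
-- ===== SOURCE B (Python) =====
-- def IsMemberLS(L, S):
--     # plain membership-by-equality scan over S
--     return any(e == L for e in S)
-- ===== Notes on version B (the rewrite author's own statement) =====
-- stated objective: simpler
-- what changed: Replaces the mutually-recursive first/tail/is_equal machinery (which copies the tail of S with slicing at every step) with a single one-line iterative equality scan any(e == L for e in S).
-- intended difference: When L is the empty list, A returns True exactly when S is also empty, never scanning S for an empty-list element; B returns genuine membership by equality of the empty list in S, which is the intended meaning of IsMemberLS. — e.g. on IsMemberLS([], [[]]): A returns false, B returns true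
import Mathlib
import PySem

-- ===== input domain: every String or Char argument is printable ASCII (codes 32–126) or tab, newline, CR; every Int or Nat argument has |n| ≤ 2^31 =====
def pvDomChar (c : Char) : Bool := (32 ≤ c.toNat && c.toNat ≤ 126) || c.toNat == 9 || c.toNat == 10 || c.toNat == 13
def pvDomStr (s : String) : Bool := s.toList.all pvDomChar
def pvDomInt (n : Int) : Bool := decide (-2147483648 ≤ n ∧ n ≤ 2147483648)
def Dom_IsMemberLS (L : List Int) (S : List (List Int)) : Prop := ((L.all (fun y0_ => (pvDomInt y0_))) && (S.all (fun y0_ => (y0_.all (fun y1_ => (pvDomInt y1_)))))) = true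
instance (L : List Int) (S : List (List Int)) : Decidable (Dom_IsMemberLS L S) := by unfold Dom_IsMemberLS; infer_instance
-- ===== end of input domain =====

-- B is a one-line iterative equality scan instead of A's mutually recursive helpers;
-- on empty L A's answer is an artefact (True iff S is empty), stated as D_ below.

-- ===== PORT A =====
-- is_empty / is_empty_LoL: L == []
def pyIsEmpty {α : Type} [BEq α] (L : List α) : Bool :=
  if L == [] then true else false

-- is_atom(e): type(e) != list — under the type convention every element of S is a list, so always false
def pyIsAtom (_e : List Int) : Bool := false

-- is_equal(L1,L2): element-wise recursion via first_element/tail_element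
def pyIsEqual : List Int → List Int → Bool
  | L1, L2 =>
    if pyIsEmpty L1 && pyIsEmpty L2 then true
    else if pyIsEmpty L1 && !(pyIsEmpty L2) then false
    else if pyIsEmpty L2 && !(pyIsEmpty L1) then false
    else
      match L1, L2 with
      | a :: t1, b :: t2 => if a == b then pyIsEqual t1 t2 else false
      | _, _ => false  -- unreachable: both lists nonempty here

def IsMemberLS (L : List Int) (S : List (List Int)) : Bool :=
  if pyIsEmpty L && pyIsEmpty S then true
  else if !(pyIsEmpty L) && pyIsEmpty S then false
  else if pyIsEmpty L && !(pyIsEmpty S) then false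
  else
    match S with
    | e :: rest =>
      if pyIsAtom e then IsMemberLS L rest
      else if pyIsEqual L e then true else IsMemberLS L rest
    | [] => false  -- unreachable: S nonempty here

-- ===== PORT B =====
def IsMemberLS_alt (L : List Int) (S : List (List Int)) : Bool :=
  S.any (fun e => e == L)

-- ===== PRECONDITION & SPEC =====
-- When L is the empty list, A returns True exactly when S is also empty, never scanning S for an
-- empty-list element; B returns genuine membership by equality, the intended meaning of IsMemberLS.
def D_IsMemberLS (L : List Int) (S : List (List Int)) : Prop :=
  L = [] ∧ (S = [] ∨ [] ∈ S)
instance (L : List Int) (S : List (List Int)) : Decidable (D_IsMemberLS L S) := by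
  unfold D_IsMemberLS; infer_instance

def Spec_IsMemberLS (L : List Int) (S : List (List Int)) (out : Bool) : Prop :=
  ¬ D_IsMemberLS L S → out = IsMemberLS_alt L S
instance (L : List Int) (S : List (List Int)) (out : Bool) : Decidable (Spec_IsMemberLS L S out) := by
  unfold Spec_IsMemberLS; infer_instance

def pvDiffWitness_IsMemberLS : List Int × List (List Int) := ([], [[]])
def pvDiffWitnessOut_IsMemberLS : Bool × Bool := (false, true)

-- ===== CLAIM (what is proved, stated in full; the proofs are below) =====
def Claim_unchanged_IsMemberLS : Prop := ∀ (L : List Int) (S : List (List Int)), Dom_IsMemberLS L S → Spec_IsMemberLS L S (IsMemberLS L S)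
def Claim_changed_IsMemberLS : Prop := Dom_IsMemberLS (pvDiffWitness_IsMemberLS.1) (pvDiffWitness_IsMemberLS.2) ∧ D_IsMemberLS (pvDiffWitness_IsMemberLS.1) (pvDiffWitness_IsMemberLS.2) ∧ IsMemberLS (pvDiffWitness_IsMemberLS.1) (pvDiffWitness_IsMemberLS.2) = pvDiffWitnessOut_IsMemberLS.1 ∧ IsMemberLS_alt (pvDiffWitness_IsMemberLS.1) (pvDiffWitness_IsMemberLS.2) = pvDiffWitnessOut_IsMemberLS.2 ∧ pvDiffWitnessOut_IsMemberLS.1 ≠ pvDiffWitnessOut_IsMemberLS.2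
def Claim_exact_IsMemberLS : Prop := ∀ (L : List Int) (S : List (List Int)), Dom_IsMemberLS L S → D_IsMemberLS L S → IsMemberLS L S ≠ IsMemberLS_alt L S

-- ===== LEMMAS AND PROOFS =====
theorem pyIsEqual_eq_beq (L1 L2 : List Int) : pyIsEqual L1 L2 = (L1 == L2) := by
  induction L1 generalizing L2 with
  | nil => cases L2 <;> simp [pyIsEqual, pyIsEmpty]
  | cons a t ih =>
    cases L2 with
    | nil => simp [pyIsEqual, pyIsEmpty]
    | cons b t2 =>
      simp only [pyIsEqual, pyIsEmpty]
      by_cases h : a = b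
      · simp [h, ih, List.cons_beq_cons]
      · simp [List.cons_beq_cons, beq_eq_false_iff_ne.mpr h]

theorem IsMemberLS_nonempty (a : Int) (t : List Int) (S : List (List Int)) :
    IsMemberLS (a :: t) S = IsMemberLS_alt (a :: t) S := by
  induction S with
  | nil => simp [IsMemberLS, IsMemberLS_alt, pyIsEmpty]
  | cons e rest ih =>
    simp only [IsMemberLS, IsMemberLS_alt, pyIsEmpty, pyIsAtom, pyIsEqual_eq_beq] at *
    by_cases h : e = a :: t
    · simp [h]
    · simp [beq_eq_false_iff_ne.mpr h, beq_eq_false_iff_ne.mpr (fun hh => h hh.symm), ih]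

theorem IsMemberLS_nil_not_mem (S : List (List Int)) (h : [] ∉ S) :
    IsMemberLS_alt ([] : List Int) S = false := by
  simp only [IsMemberLS_alt, List.any_eq_false]
  intro e he
  intro hc
  exact h ((beq_iff_eq.mp hc) ▸ he)

theorem IsMemberLS_nil_eq_false (S : List (List Int)) (hS : S ≠ []) :
    IsMemberLS ([] : List Int) S = false := by
  cases S with
  | nil => exact absurd rfl hS
  | cons e rest => simp [IsMemberLS, pyIsEmpty]

-- ===== VERDICT (by name: the statement is the Claim_ definition above) =====
theorem IsMemberLS_spec : Claim_unchanged_IsMemberLS := by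
  intro L S _ hD
  cases L with
  | cons a t => exact IsMemberLS_nonempty a t S
  | nil =>
    unfold D_IsMemberLS at hD
    push Not at hD
    obtain ⟨hS, hmem⟩ := hD rfl
    rw [IsMemberLS_nil_eq_false S hS, IsMemberLS_nil_not_mem S hmem]

theorem IsMemberLS_changed : Claim_changed_IsMemberLS := by
  unfold Claim_changed_IsMemberLS; decide

theorem IsMemberLS_tight : Claim_exact_IsMemberLS := by
  intro L S _ hD
  obtain ⟨hL, hS⟩ := hD
  subst hL
  cases hS with
  | inl h => subst h; decide
  | inr h =>
    have hne : S ≠ [] := by rintro rfl; simp at h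
    rw [IsMemberLS_nil_eq_false S hne]
    simp only [IsMemberLS_alt]
    intro hcontra
    have : S.any (fun e => e == ([] : List Int)) = true :=
      List.any_eq_true.mpr ⟨[], h, by decide⟩
    rw [this] at hcontra
    exact absurd hcontra (by decide)
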